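-- pv_equiv track=rewrite | github.com/dlwndmssla/BaejoonHub | 백준/Silver/11497. 통나무 건너뛰기/통나무 건너뛰기.py | logs_level
-- ===== SOURCE A (Python) =====
-- def logs_level(a, log):
--
--     idx = []
--     log.sort()
--     for i in range(a):
--         if i%2 == 0:
--             idx.append(int(i/2))
--         else:
--             idx.append(a-int(i/2)-1)
--     idx.append(0)
--     logs = [0]*(a)
--     for j in range(a):
--         logs[idx[j]] = log[j]
--     logs.append(log[0])
--     level = 0
--     for k in range(1,a+1):
--         level = max(abs(logs[k]-logs[k-1]),level)
--
--     return level
-- ===== SOURCE B (Python) =====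
-- def logs_level(a, log):
--     log.sort()
--     if a <= 1:
--         return 0
--     best = max(log[1] - log[0], log[a - 1] - log[a - 2])
--     for i in range(2, a):
--         d = log[i] - log[i - 2]
--         if d > best:
--             best = d
--     return best
-- ===== Notes on version B (the rewrite author's own statement) =====
-- stated objective: simpler
-- what changed: B drops A's zigzag index list, scatter-filled arrangement array and circular scan, computing the answer directly from the sorted list as the maximum of log[1]-log[0], log[a-1]-log[a-2] and the gaps log[i]-log[i-2].
-- crash fix: On inputs with a <= 1 and an empty log, A raises IndexError reading log[0]; B returns 0. — e.g. on logs_level(0, []): A raises IndexError, B returns 0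
import Mathlib
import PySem

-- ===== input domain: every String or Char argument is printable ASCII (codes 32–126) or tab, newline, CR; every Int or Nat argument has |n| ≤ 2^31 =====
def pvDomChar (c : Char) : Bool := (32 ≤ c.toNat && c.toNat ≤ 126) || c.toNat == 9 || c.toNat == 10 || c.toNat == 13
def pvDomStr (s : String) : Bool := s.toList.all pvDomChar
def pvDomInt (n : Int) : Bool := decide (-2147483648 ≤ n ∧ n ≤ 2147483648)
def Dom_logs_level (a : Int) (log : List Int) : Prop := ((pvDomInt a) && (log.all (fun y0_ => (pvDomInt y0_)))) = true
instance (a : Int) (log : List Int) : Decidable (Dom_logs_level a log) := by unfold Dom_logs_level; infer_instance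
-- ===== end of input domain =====

-- B replaces A's zigzag index/scatter arrangement and circular scan by the closed-form maximum
-- over sorted-list gaps (objective: simpler — one pass, no temporary lists). Equivalence is about
-- the RETURN value; both A and B sort `log` in place (same side effect).

-- ===== PORT A =====
-- `int(i/2)` is truncating division; for the nonnegative i drawn from range(a) it equals floor division.
def logs_level (a : Int) (log : List Int) : Int :=
  let slog := PySem.List.sorted log (fun x => x) false   -- log.sort()
  let idx : List Int :=
    (PySem.List.pyRange 0 a 1).foldl
      (fun idx i =>
        if PySem.Int.mod i 2 == 0 then idx ++ [PySem.Int.floordiv i 2]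
        else idx ++ [a - PySem.Int.floordiv i 2 - 1]) []
  let idx := idx ++ [0]
  let logs : List Int := List.replicate a.toNat 0        -- [0]*(a) ([] for a ≤ 0)
  -- logs[idx[j]] = log[j]; pyGetD/pySetD are the total forms, exact under Pre_ (indices in range)
  let logs :=
    (PySem.List.pyRange 0 a 1).foldl
      (fun logs j => PySem.List.pySetD logs (PySem.List.pyGetD idx j 0) (PySem.List.pyGetD slog j 0)) logs
  let logs := logs ++ [PySem.List.pyGetD slog 0 0]
  (PySem.List.pyRange 1 (a + 1) 1).foldl
    (fun level k => max |PySem.List.pyGetD logs k 0 - PySem.List.pyGetD logs (k - 1) 0| level) 0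

-- ===== PORT B =====
def logs_level_alt (a : Int) (log : List Int) : Int :=
  let s := PySem.List.sorted log (fun x => x) false      -- log.sort()
  if a ≤ 1 then 0
  else
    let best := max (PySem.List.pyGetD s 1 0 - PySem.List.pyGetD s 0 0)
                    (PySem.List.pyGetD s (a - 1) 0 - PySem.List.pyGetD s (a - 2) 0)
    (PySem.List.pyRange 2 a 1).foldl
      (fun best i =>
        let d := PySem.List.pyGetD s i 0 - PySem.List.pyGetD s (i - 2) 0
        if best < d then d else best) best

-- ===== PRECONDITION & SPEC =====
-- Pre_ is exactly where A returns: log nonempty (A reads log[0]) and a ≤ len(log) (A reads log[a-1]).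
def Pre_logs_level (a : Int) (log : List Int) : Prop := log ≠ [] ∧ a ≤ (log.length : Int)
instance (a : Int) (log : List Int) : Decidable (Pre_logs_level a log) := by unfold Pre_logs_level; infer_instance
def pvWitness_logs_level : Int × List Int := (2, [3, 1])

-- On a ≤ 1 with an empty log, A raises IndexError reading log[0]; B returns 0.
def Raises_logs_level (a : Int) (log : List Int) : Prop := a ≤ 1 ∧ log = []
instance (a : Int) (log : List Int) : Decidable (Raises_logs_level a log) := by unfold Raises_logs_level; infer_instance
def pvRaiseWitness_logs_level : Int × List Int := (0, [])
def pvRaiseWitnessOut_logs_level : Int := 0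

def Spec_logs_level (a : Int) (log : List Int) (out : Int) : Prop := out = logs_level_alt a log
instance (a : Int) (log : List Int) (out : Int) : Decidable (Spec_logs_level a log out) := by unfold Spec_logs_level; infer_instance

-- ===== CLAIM (what is proved, stated in full; the proofs are below) =====
def Claim_equal_logs_level : Prop := ∀ (a : Int) (log : List Int), Dom_logs_level a log → Pre_logs_level a log → Spec_logs_level a log (logs_level a log)
def Claim_raises_logs_level : Prop := (∀ (a : Int) (log : List Int), Dom_logs_level a log → Raises_logs_level a log → ¬ Pre_logs_level a log) ∧ (Dom_logs_level (pvRaiseWitness_logs_level.1) (pvRaiseWitness_logs_level.2) ∧ Raises_logs_level (pvRaiseWitness_logs_level.1) (pvRaiseWitness_logs_level.2) ∧ logs_level_alt (pvRaiseWitness_logs_level.1) (pvRaiseWitness_logs_level.2) = pvRaiseWitnessOut_logs_level)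

-- ===== LEMMAS AND PROOFS =====

-- the zigzag target position of sorted element i (A's idx[i]), and its inverse
def pvIdxN (n i : Nat) : Nat := if i % 2 = 0 then i / 2 else n - i / 2 - 1
def pvInvN (n p : Nat) : Nat := if 2 * p < n then 2 * p else 2 * (n - 1 - p) + 1

theorem pvInvN_lt {n p : Nat} (hp : p < n) : pvInvN n p < n := by
  unfold pvInvN; split <;> omega

theorem pvIdxN_invN {n p : Nat} (hp : p < n) : pvIdxN n (pvInvN n p) = p := by
  unfold pvIdxN pvInvN
  split
  · simp
  · simp
    omega

theorem pvInvN_idxN {n i : Nat} (hi : i < n) : pvInvN n (pvIdxN n i) = i := by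
  unfold pvIdxN pvInvN; split <;> split <;> omega

-- A's scatter loop, fully characterized
theorem pv_scatter (n : Nat) (g : Nat → Int) :
    ∀ j ≤ n,
      (List.range j).foldl (fun logs i => logs.set (pvIdxN n i) (g i)) (List.replicate n 0)
        = (List.range n).map (fun p => if pvInvN n p < j then g (pvInvN n p) else 0) := by
  intro j
  induction j with
  | zero =>
    intro _
    simp only [List.range_zero, List.foldl_nil, Nat.not_lt_zero, if_false]
    rw [List.map_const', List.length_range]
  | succ j ih =>
    intro hj
    rw [List.range_succ, List.foldl_append, ih (Nat.le_of_succ_le hj)]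
    simp only [List.foldl_cons, List.foldl_nil]
    have hjn : j < n := hj
    apply List.ext_getElem
    · simp
    intro p hp hp'
    simp only [List.length_set, List.length_map, List.length_range] at hp
    simp only [List.getElem_set, List.getElem_map, List.getElem_range]
    by_cases hpe : pvIdxN n j = p
    · subst hpe
      have h1 : pvInvN n (pvIdxN n j) = j := pvInvN_idxN hjn
      simp [h1]
    · have hne : pvInvN n p ≠ j := by
        intro h
        exact hpe (by rw [← h, pvIdxN_invN (n := n) hp])
      have : (pvInvN n p < j + 1) ↔ (pvInvN n p < j) := by omega
      simp [hpe, this]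

-- loop shapes: the two max loops as foldl max over mapped lists
theorem pv_foldl_max_flip {α : Type} (f : α → Int) (l : List α) (z : Int) :
    l.foldl (fun acc x => max (f x) acc) z = (l.map f).foldl max z := by
  induction l generalizing z with
  | nil => rfl
  | cons x t ih =>
    simp only [List.foldl_cons, List.map_cons, ih]
    rw [max_comm (f x) z]

theorem pv_foldl_max_if {α : Type} (f : α → Int) (l : List α) (z : Int) :
    l.foldl (fun acc x => if acc < f x then f x else acc) z = (l.map f).foldl max z := by
  induction l generalizing z with
  | nil => rfl
  | cons x t ih =>
    simp only [List.foldl_cons, List.map_cons, ih]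
    congr 1
    rcases lt_or_ge z (f x) with h | h
    · simp [h, max_eq_right h.le]
    · simp [not_lt.mpr h, max_eq_left h]

theorem pv_foldl_max_le {l : List Int} {z m : Int} (hz : z ≤ m) (hl : ∀ x ∈ l, x ≤ m) :
    l.foldl max z ≤ m := by
  induction l generalizing z with
  | nil => exact hz
  | cons x t ih =>
    exact ih (max_le hz (hl x (by simp))) (fun y hy => hl y (by simp [hy]))

-- sorted values, A's arrangement, A's gap list, B's gap list
def pvSg (log : List Int) (i : Nat) : Int := (PySem.List.sorted log (fun x => x) false).getD i 0
def pvArr (log : List Int) (n k : Nat) : Int := if k < n then pvSg log (pvInvN n k) else pvSg log 0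
def pvFA (log : List Int) (n t : Nat) : Int := |pvArr log n (t + 1) - pvArr log n t|
def pvDB (log : List Int) (t : Nat) : Int := pvSg log (t + 2) - pvSg log t

theorem pv_mono (log : List Int) {p q n : Nat} (hpq : p ≤ q) (hq : q < n) (hn : n ≤ log.length) :
    pvSg log p ≤ pvSg log q := by
  unfold pvSg
  have hl : (PySem.List.sorted log (fun x => x) false).length = log.length :=
    PySem.List.length_sorted log (fun x => x) false
  have hq' : q < (PySem.List.sorted log (fun x => x) false).length := by omega
  rw [List.getD_eq_getElem _ _ (by omega), List.getD_eq_getElem _ _ hq']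
  exact PySem.List.sorted_id_getElem_mono log hpq hq'

-- closed form of A's k-th gap in the zigzag arrangement
theorem pv_FA_val (log : List Int) (n : Nat) (h2 : 2 ≤ n) (hn : n ≤ log.length)
    (t : Nat) (ht : t < n) :
    pvFA log n t =
      if t + 1 = n then pvSg log 1 - pvSg log 0
      else if 2 * (t + 1) < n then pvDB log (2 * t)
      else if 2 * t < n then pvSg log (n - 1) - pvSg log (n - 2)
      else pvDB log (2 * (n - t - 2) + 1) := by
  have habs : ∀ p q : Nat, p ≤ q → q < n → |pvSg log p - pvSg log q| = pvSg log q - pvSg log p := by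
    intro p q hpq hq
    rw [abs_sub_comm]
    exact abs_of_nonneg (sub_nonneg.mpr (pv_mono log hpq hq hn))
  unfold pvFA pvArr pvDB pvInvN
  by_cases h1 : t + 1 = n
  · -- last gap: back to position 0, which holds sg 0; position n-1 holds sg 1
    rw [if_pos h1]
    rw [if_neg (by omega), if_pos (by omega), if_neg (by omega)]
    have e1 : 2 * (n - 1 - t) + 1 = 1 := by omega
    rw [e1]
    exact habs 0 1 (by omega) (by omega)
  · rw [if_neg h1, if_pos (by omega : t + 1 < n), if_pos ht]
    by_cases hA : 2 * (t + 1) < n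
    · -- both positions in the ascending half
      rw [if_pos hA, if_pos (by omega : 2 * t < n), if_pos hA]
      have e1 : 2 * (t + 1) = 2 * t + 2 := by omega
      rw [e1]
      exact abs_of_nonneg (sub_nonneg.mpr (pv_mono log (by omega) (by omega) hn))
    · rw [if_neg hA, if_neg hA]
      by_cases hB : 2 * t < n
      · -- the crossing gap: its endpoints are sg (n-1) and sg (n-2), in either order
        rw [if_pos hB, if_pos hB]
        rcases (by omega : n = 2 * t + 1 ∨ n = 2 * t + 2) with hc | hc
        · have e1 : 2 * (n - 1 - (t + 1)) + 1 = n - 2 := by omega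
          have e2 : 2 * t = n - 1 := by omega
          rw [e1, e2]
          exact habs (n - 2) (n - 1) (by omega) (by omega)
        · have e1 : 2 * (n - 1 - (t + 1)) + 1 = n - 1 := by omega
          have e2 : 2 * t = n - 2 := by omega
          rw [e1, e2, abs_sub_comm]
          exact habs (n - 2) (n - 1) (by omega) (by omega)
      · -- both positions in the descending half
        rw [if_neg hB, if_neg hB]
        have e1 : 2 * (n - 1 - (t + 1)) + 1 = 2 * (n - t - 2) + 1 := by omega
        have e2 : 2 * (n - 1 - t) + 1 = 2 * (n - t - 2) + 1 + 2 := by omega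
        rw [e1, e2]
        exact habs _ _ (by omega) (by omega)

theorem pv_max_eq (log : List Int) (n : Nat) (h2 : 2 ≤ n) (hn : n ≤ log.length) :
    ((List.range n).map (pvFA log n)).foldl max 0
      = ((List.range (n - 2)).map (pvDB log)).foldl max
          (max (pvSg log 1 - pvSg log 0) (pvSg log (n - 1) - pvSg log (n - 2))) := by
  set t1 := pvSg log 1 - pvSg log 0 with ht1
  set t2 := pvSg log (n - 1) - pvSg log (n - 2) with ht2
  set MB := ((List.range (n - 2)).map (pvDB log)).foldl max (max t1 t2) with hMB
  set MA := ((List.range n).map (pvFA log n)).foldl max 0 with hMA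
  have hbaseB : max t1 t2 ≤ MB := (PySem.List.le_foldl_max _ _).1
  have hmemB : ∀ u, u < n - 2 → pvDB log u ≤ MB := by
    intro u hu
    exact (PySem.List.le_foldl_max _ _).2 _ (List.mem_map_of_mem (List.mem_range.mpr hu))
  have hmemA : ∀ t, t < n → pvFA log n t ≤ MA := by
    intro t htn
    exact (PySem.List.le_foldl_max _ _).2 _ (List.mem_map_of_mem (List.mem_range.mpr htn))
  apply le_antisymm
  · apply pv_foldl_max_le
    · have h01 : (0 : Int) ≤ t1 := by
        rw [ht1]
        exact sub_nonneg.mpr (pv_mono log (by omega) (by omega) hn)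
      exact le_trans h01 (le_trans (le_max_left t1 t2) hbaseB)
    · intro y hy
      rcases List.mem_map.mp hy with ⟨t, htm, rfl⟩
      have htn : t < n := List.mem_range.mp htm
      rw [pv_FA_val log n h2 hn t htn]
      split_ifs with c1 c2 c3
      · exact le_trans (le_max_left t1 t2) hbaseB
      · exact hmemB (2 * t) (by omega)
      · exact le_trans (le_max_right t1 t2) hbaseB
      · exact hmemB (2 * (n - t - 2) + 1) (by omega)
  · apply pv_foldl_max_le
    · apply max_le
      · have e : t1 = pvFA log n (n - 1) := by
          rw [pv_FA_val log n h2 hn (n - 1) (by omega), if_pos (by omega)]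
        rw [e]
        exact hmemA (n - 1) (by omega)
      · have e : t2 = pvFA log n ((n - 1) / 2) := by
          rw [pv_FA_val log n h2 hn ((n - 1) / 2) (by omega),
            if_neg (by omega), if_neg (by omega), if_pos (by omega)]
        rw [e]
        exact hmemA ((n - 1) / 2) (by omega)
    · intro y hy
      rcases List.mem_map.mp hy with ⟨u, hum, rfl⟩
      have hu : u < n - 2 := List.mem_range.mp hum
      by_cases hpar : u % 2 = 0
      · have e : pvDB log u = pvFA log n (u / 2) := by
          rw [pv_FA_val log n h2 hn (u / 2) (by omega),
            if_neg (by omega), if_pos (by omega)]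
          have : 2 * (u / 2) = u := by omega
          rw [this]
        rw [e]
        exact hmemA (u / 2) (by omega)
      · have e : pvDB log u = pvFA log n (n - 2 - (u - 1) / 2) := by
          rw [pv_FA_val log n h2 hn (n - 2 - (u - 1) / 2) (by omega),
            if_neg (by omega), if_neg (by omega), if_neg (by omega)]
          have : 2 * (n - (n - 2 - (u - 1) / 2) - 2) + 1 = u := by omega
          rw [this]
        rw [e]
        exact hmemA (n - 2 - (u - 1) / 2) (by omega)

theorem pv_main (log : List Int) (n : Nat) (h2 : 2 ≤ n) (hn : n ≤ log.length) :
    logs_level (n : Int) log = logs_level_alt (n : Int) log := by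
  have hsl : (PySem.List.sorted log (fun x => x) false).length = log.length :=
    PySem.List.length_sorted log (fun x => x) false
  have harr : ∀ k : Nat, k ≤ n →
      PySem.List.pyGetD ((List.range n).map (fun p => pvSg log (pvInvN n p)) ++ [pvSg log 0]) (↑k) 0
        = pvArr log n k := by
    intro k hk
    rw [PySem.List.pyGetD_natCast]
    rcases lt_or_eq_of_le hk with hlt | heq
    · rw [List.getD_eq_getElem _ _ (by simp; omega)]
      rw [List.getElem_append_left (by simpa using hlt)]
      simp [pvArr, hlt]
    · subst heq
      rw [List.getD_eq_getElem _ _ (by simp)]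
      rw [List.getElem_append_right (by simp)]
      simp [pvArr]
  have hA : logs_level (↑n) log = ((List.range n).map (pvFA log n)).foldl max 0 := by
    unfold logs_level
    simp only [Int.toNat_natCast, PySem.List.pyRange_zero_natCast, List.foldl_map]
    have hidx : List.foldl (fun (x : List Int) (y : Nat) =>
        if (PySem.Int.mod (↑y) 2 == 0) = true then x ++ [PySem.Int.floordiv (↑y) 2]
        else x ++ [(n : Int) - PySem.Int.floordiv (↑y) 2 - 1]) [] (List.range n)
        = (List.range n).map (fun i => ((pvIdxN n i : Nat) : Int)) := by
      rw [PySem.List.foldl_congr_mem (List.range n) _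
        (fun (x : List Int) (y : Nat) => x ++ [((pvIdxN n y : Nat) : Int)]) []
        (by
          intro acc i hi
          have hi' := List.mem_range.mp hi
          have hm : PySem.Int.mod (↑i) 2 = ((i % 2 : Nat) : Int) := by
            exact_mod_cast PySem.Int.mod_natCast i 2
          have hf : PySem.Int.floordiv (↑i) 2 = ((i / 2 : Nat) : Int) := by
            exact_mod_cast PySem.Int.floordiv_natCast i 2
          rw [hm, hf]
          unfold pvIdxN
          by_cases hp : i % 2 = 0
          · simp [hp]
          · have hb : (((i % 2 : Nat) : Int) == 0) = false := by
              simp; omega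
            rw [hb]
            simp only [Bool.false_eq_true, if_false, if_neg hp, List.append_cancel_left_eq,
              List.cons.injEq, and_true]
            push_cast
            omega)]
      simpa using PySem.List.foldl_append_singleton_eq_map
        (fun i : Nat => ((pvIdxN n i : Nat) : Int)) (List.range n) []
    rw [hidx]
    have hidxget : ∀ j : Nat, j < n →
        PySem.List.pyGetD ((List.range n).map (fun i => ((pvIdxN n i : Nat) : Int)) ++ [0]) (↑j) 0
          = ((pvIdxN n j : Nat) : Int) := by
      intro j hj
      rw [PySem.List.pyGetD_natCast]
      rw [List.getD_eq_getElem _ _ (by simp; omega)]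
      rw [List.getElem_append_left (by simpa using hj)]
      simp
    rw [PySem.List.foldl_congr_mem (List.range n) _
      (fun (logs : List Int) (j : Nat) => logs.set (pvIdxN n j) (pvSg log j)) (List.replicate n 0)
      (by
        intro acc j hj
        rw [hidxget j (List.mem_range.mp hj), PySem.List.pySetD_natCast,
          PySem.List.pyGetD_natCast]
        rfl)]
    rw [pv_scatter n (pvSg log) n le_rfl]
    have hmap : (List.range n).map (fun p => if pvInvN n p < n then pvSg log (pvInvN n p) else 0)
        = (List.range n).map (fun p => pvSg log (pvInvN n p)) :=
      List.map_congr_left (fun p hp => by rw [if_pos (pvInvN_lt (List.mem_range.mp hp))])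
    rw [hmap]
    have h0 : PySem.List.pyGetD (PySem.List.sorted log (fun x => x) false) 0 0 = pvSg log 0 := by
      simpa using PySem.List.pyGetD_natCast (PySem.List.sorted log (fun x => x) false) 0 0
    rw [h0]
    rw [PySem.List.pyRange_one 1 ((n : Int) + 1)]
    rw [show ((n : Int) + 1 - 1) = (n : Int) by ring, Int.toNat_natCast, List.foldl_map]
    rw [PySem.List.foldl_congr_mem (List.range n) _
      (fun (level : Int) (t : Nat) => max (pvFA log n t) level) 0
      (by
        intro level t ht
        have ht' := List.mem_range.mp ht
        have e1 : (1 + (t : Int)) = ((t + 1 : Nat) : Int) := by push_cast; ring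
        have e2 : (1 + (t : Int) - 1) = ((t : Nat) : Int) := by ring
        rw [e2, e1, harr (t + 1) (by omega), harr t (by omega)]
        rfl)]
    rw [pv_foldl_max_flip, List.foldl_map]
  have hB : logs_level_alt (↑n) log
      = ((List.range (n - 2)).map (pvDB log)).foldl max
          (max (pvSg log 1 - pvSg log 0) (pvSg log (n - 1) - pvSg log (n - 2))) := by
    unfold logs_level_alt
    rw [if_neg (by omega : ¬ (n : Int) ≤ 1)]
    have g1 : PySem.List.pyGetD (PySem.List.sorted log (fun x => x) false) 1 0 = pvSg log 1 := by
      simpa using PySem.List.pyGetD_natCast (PySem.List.sorted log (fun x => x) false) 1 0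
    have g0 : PySem.List.pyGetD (PySem.List.sorted log (fun x => x) false) 0 0 = pvSg log 0 := by
      simpa using PySem.List.pyGetD_natCast (PySem.List.sorted log (fun x => x) false) 0 0
    have gn1 : PySem.List.pyGetD (PySem.List.sorted log (fun x => x) false) ((n : Int) - 1) 0
        = pvSg log (n - 1) := by
      rw [show ((n : Int) - 1) = ((n - 1 : Nat) : Int) by omega]
      exact PySem.List.pyGetD_natCast _ _ _
    have gn2 : PySem.List.pyGetD (PySem.List.sorted log (fun x => x) false) ((n : Int) - 2) 0
        = pvSg log (n - 2) := by
      rw [show ((n : Int) - 2) = ((n - 2 : Nat) : Int) by omega]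
      exact PySem.List.pyGetD_natCast _ _ _
    rw [g1, g0, gn1, gn2]
    rw [PySem.List.pyRange_one 2 (n : Int)]
    rw [show ((n : Int) - 2).toNat = n - 2 by omega, List.foldl_map]
    rw [PySem.List.foldl_congr_mem (List.range (n - 2)) _
      (fun (best : Int) (t : Nat) => if best < pvDB log t then pvDB log t else best) _
      (by
        intro best t ht
        have e1 : (2 + (t : Int)) = ((t + 2 : Nat) : Int) := by push_cast; ring
        have e2 : (2 + (t : Int) - 2) = ((t : Nat) : Int) := by ring
        dsimp only
        rw [e2, e1, PySem.List.pyGetD_natCast, PySem.List.pyGetD_natCast]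
        rfl)]
    rw [pv_foldl_max_if, List.foldl_map]
  rw [hA, hB, pv_max_eq log n h2 hn]

-- ===== VERDICT (by name: the statement is the Claim_ definition above) =====
theorem logs_level_spec : Claim_equal_logs_level := by
  intro a log _ hpre
  unfold Spec_logs_level
  rcases hpre with ⟨hne, hlen⟩
  by_cases h2 : 2 ≤ a
  · have ha : a = ((a.toNat : Nat) : Int) := by omega
    rw [ha]
    exact pv_main log a.toNat (by omega) (by omega)
  · -- a ≤ 1: B returns 0; A's answer is 0 (no gap, or the single zero gap)
    have hbz : logs_level_alt a log = 0 := by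
      unfold logs_level_alt
      rw [if_pos (by omega)]
    rw [hbz]
    rcases (by omega : a ≤ 0 ∨ a = 1) with h0 | h1
    · have hr1 : PySem.List.pyRange 0 a 1 = [] := PySem.List.pyRange_one_eq_nil h0
      have hr2 : PySem.List.pyRange 1 (a + 1) 1 = [] := PySem.List.pyRange_one_eq_nil (by omega)
      unfold logs_level
      simp only [hr1, hr2, List.foldl_nil]
    · subst h1
      have hr1 : PySem.List.pyRange 0 1 1 = [0] := by decide
      have hr2 : PySem.List.pyRange 1 (1 + 1) 1 = [1] := by decide
      have hm : (PySem.Int.mod 0 2 == (0 : Int)) = true := by decide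
      have hf : PySem.Int.floordiv 0 2 = 0 := by decide
      unfold logs_level
      simp only [hr1, hr2, List.foldl_cons, List.foldl_nil, hm, if_true, hf, Int.toNat_one,
        List.replicate_one, List.nil_append]
      have hg : PySem.List.pyGetD (([0] ++ [0]) : List Int) 0 0 = 0 := by decide
      rw [hg]
      set X := PySem.List.pyGetD (PySem.List.sorted log (fun x => x) false) 0 0 with hX
      have hset : PySem.List.pySetD [0] 0 X = [X] := by
        rw [PySem.List.pySetD_of_nonneg]
        · rfl
        · decide
      rw [hset]
      have g1 : PySem.List.pyGetD ([X] ++ [X]) 1 0 = X := by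
        simp [PySem.List.pyGetD, PySem.List.pyGet?, PySem.List.pyIdx?]
      have g0 : PySem.List.pyGetD ([X] ++ [X]) (1 - 1) 0 = X := by
        simp [PySem.List.pyGetD, PySem.List.pyGet?, PySem.List.pyIdx?]
      rw [g1, g0, sub_self, abs_zero, max_self]

@[simp] theorem logs_level_raises : Claim_raises_logs_level := by
  unfold Claim_raises_logs_level
  constructor
  · intro a log _ hr hp
    exact hp.1 hr.2
  · exact ⟨by decide, by decide, by decide⟩
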